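-- pv_equiv track=rewrite | github.com/anuragprat1k/discovery | iterative_countdown/environment/problem_generator.py | _find_min_steps
-- ===== SOURCE A (Python) =====
-- import itertools
--
-- def _eval_left_to_right(nums: list[int], ops: list[str]) -> int | None:
--     """Evaluate a left-to-right expression. Returns None if invalid."""
--     result = nums[0]
--     for i, op in enumerate(ops):
--         val = nums[i + 1]
--         if op == "+":
--             result = result + val
--         elif op == "-":
--             result = result - val
--         elif op == "*":
--             result = result * val
--         elif op == "/":
--             if val == 0 or result % val != 0:
--                 return None
--             result = result // val
--     return result
--
-- def _find_min_steps(target: int, numbers: list[int]) -> int: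
--     """Find the minimum number of operations needed to reach the target."""
--     ops = ["+", "-", "*", "/"]
--
--     for n_nums in range(1, min(len(numbers) + 1, 7)):
--         for combo in itertools.combinations(range(len(numbers)), n_nums):
--             subset = [numbers[i] for i in combo]
--             if n_nums == 1:
--                 if subset[0] == target:
--                     return 0  # no operations needed
--                 continue
--             for perm in itertools.permutations(subset):
--                 for op_combo in itertools.product(ops, repeat=n_nums - 1):
--                     result = _eval_left_to_right(list(perm), list(op_combo))
--                     if result == target:
--                         return n_nums - 1  # number of operations
--     return -1  # no exact solution found
-- ===== SOURCE B (Python) =====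
-- def _expand(v: int, x: int) -> list[int]:
--     out = [v + x, v - x, v * x]
--     if x != 0 and v % x == 0:
--         out.append(v // x)
--     return out
--
-- def _find_min_steps(target: int, numbers: list[int]) -> int:
--     """Level-by-level BFS over (used-index-bitmask, value) states, deduplicated with a set."""
--     n = len(numbers)
--     cap = min(n, 6)
--     frontier = {(1 << i, numbers[i]) for i in range(n)}
--     k = 1
--     while k <= cap:
--         if any(v == target for (_, v) in frontier):
--             return k - 1
--         if k == cap:
--             break
--         frontier = {(mask | (1 << i), w)
--                     for (mask, v) in frontier
--                     for i in range(n)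
--                     if not (mask >> i) & 1
--                     for w in _expand(v, numbers[i])}
--         k += 1
--     return -1
-- ===== Notes on version B (the rewrite author's own statement) =====
-- stated objective: alternative
-- what changed: Replaces A's enumeration of combinations x permutations x operator tuples (re-evaluating every full expression) with a level-by-level BFS over deduplicated (used-index-bitmask, value) states, extending each state by one unused number and one operator; removes the k! permutation factor but both remain exponential in min(n,6).
import Mathlib
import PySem

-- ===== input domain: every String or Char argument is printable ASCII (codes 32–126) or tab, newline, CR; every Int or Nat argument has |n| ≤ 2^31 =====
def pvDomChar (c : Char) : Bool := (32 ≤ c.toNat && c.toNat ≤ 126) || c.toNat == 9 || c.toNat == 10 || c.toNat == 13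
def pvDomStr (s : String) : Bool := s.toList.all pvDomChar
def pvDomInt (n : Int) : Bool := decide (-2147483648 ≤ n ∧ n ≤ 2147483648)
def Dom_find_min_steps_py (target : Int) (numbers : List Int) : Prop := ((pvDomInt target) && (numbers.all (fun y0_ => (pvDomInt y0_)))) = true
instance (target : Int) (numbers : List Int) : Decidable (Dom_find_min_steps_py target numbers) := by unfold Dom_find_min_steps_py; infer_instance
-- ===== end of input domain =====

-- B replaces A's combinations x permutations x operator-tuple enumeration by a level-by-level BFS
-- over deduplicated (used-index-bitmask, value) states (alternative algorithm, same exponential cost).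


-- ===== PORT A =====
-- ops = ["+", "-", "*", "/"]
def pvOpsA : List String := ["+", "-", "*", "/"]

-- the loop body of _eval_left_to_right: result folded over (op, val) pairs
def pvEvalLoop : Int → List (String × Int) → Option Int
  | result, [] => some result
  | result, (op, val) :: rest =>
    if op = "+" then pvEvalLoop (result + val) rest
    else if op = "-" then pvEvalLoop (result - val) rest
    else if op = "*" then pvEvalLoop (result * val) rest
    else if op = "/" then
      if val = 0 ∨ PySem.Int.mod result val ≠ 0 then none
      else pvEvalLoop (PySem.Int.floordiv result val) rest
    else pvEvalLoop result rest

-- _eval_left_to_right(nums, ops); callers guarantee len(nums) = len(ops) + 1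
def pvEvalLTR (nums : List Int) (ops : List String) : Option Int :=
  match nums with
  | [] => none
  | h :: t => pvEvalLoop h (ops.zip t)

-- itertools.product(ops, repeat=m)
def pvOpLists : Nat → List (List String)
  | 0 => [[]]
  | m + 1 => pvOpsA.flatMap (fun o => (pvOpLists m).map (fun tl => o :: tl))

-- the body of A's outer loop for one value of n_nums (= k); `return` ported as findSome?
def pvLevelA (target : Int) (numbers : List Int) (k : Nat) : Option Int :=
  (PySem.List.combinations (List.range numbers.length) k).findSome? (fun combo =>
    let subset := combo.map (fun i => numbers.getD i 0)
    if k = 1 then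
      if subset.getD 0 0 = target then some 0 else none
    else
      (PySem.List.permutations subset subset.length).findSome? (fun perm =>
        (pvOpLists (k - 1)).findSome? (fun opsl =>
          if pvEvalLTR perm opsl = some target then some ((k : Int) - 1) else none)))

def find_min_steps_py (target : Int) (numbers : List Int) : Int :=
  ((List.range' 1 (min (numbers.length + 1) 7 - 1)).findSome? (pvLevelA target numbers)).getD (-1)

-- ===== PORT B =====
-- _expand(v, x)
def pvExpand (v x : Int) : List Int :=
  [v + x, v - x, v * x] ++ (if x ≠ 0 ∧ PySem.Int.mod v x = 0 then [PySem.Int.floordiv v x] else [])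

-- {(1 << i, numbers[i]) for i in range(n)}
def pvInit (numbers : List Int) : PySem.Set (Nat × Int) :=
  PySem.Set.ofList ((List.range numbers.length).map (fun i => (1 <<< i, numbers.getD i 0)))

-- the set comprehension building the next BFS frontier
def pvNextF (numbers : List Int) (frontier : PySem.Set (Nat × Int)) : PySem.Set (Nat × Int) :=
  PySem.Set.ofList (frontier.flatMap (fun mv =>
    ((List.range numbers.length).filter (fun i => !(mv.1.testBit i))).flatMap (fun i =>
      (pvExpand mv.2 (numbers.getD i 0)).map (fun w => (mv.1 ||| (1 <<< i), w)))))

-- the while loop; fuel = cap + 1 - k iterations remain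
def pvBfs (target : Int) (numbers : List Int) (cap : Nat) : Nat → Nat → PySem.Set (Nat × Int) → Int
  | 0, _, _ => -1
  | fuel + 1, k, frontier =>
    if frontier.any (fun mv => mv.2 == target) then (k : Int) - 1
    else if k = cap then -1
    else pvBfs target numbers cap fuel (k + 1) (pvNextF numbers frontier)

def find_min_steps_py_alt (target : Int) (numbers : List Int) : Int :=
  let cap := min numbers.length 6
  pvBfs target numbers cap cap 1 (pvInit numbers)

-- ===== PRECONDITION & SPEC =====
def Spec_find_min_steps_py (target : Int) (numbers : List Int) (out : Int) : Prop := out = find_min_steps_py_alt target numbers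
instance (target : Int) (numbers : List Int) (out : Int) : Decidable (Spec_find_min_steps_py target numbers out) := by unfold Spec_find_min_steps_py; infer_instance

-- ===== CLAIM (what is proved, stated in full; the proofs are below) =====
def Claim_equal_find_min_steps_py : Prop := ∀ (target : Int) (numbers : List Int), Dom_find_min_steps_py target numbers → Spec_find_min_steps_py target numbers (find_min_steps_py target numbers)

-- ===== LEMMAS AND PROOFS =====

-- one left-to-right evaluation step, for the proofs
def pvStep (r v : Int) (op : String) : Option Int :=
  if op = "+" then some (r + v)
  else if op = "-" then some (r - v)
  else if op = "*" then some (r * v)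
  else if op = "/" then
    if v = 0 ∨ PySem.Int.mod r v ≠ 0 then none else some (PySem.Int.floordiv r v)
  else some r

-- bitmask of a list of indices
def pvMask : List Nat → Nat
  | [] => 0
  | i :: t => (1 <<< i) ||| pvMask t

-- value t is reachable using exactly the k distinct indices of mask m
def pvReach (numbers : List Int) (k : Nat) (m : Nat) (t : Int) : Prop :=
  ∃ ixs ops, ixs.Nodup ∧ ixs.length = k ∧ (∀ i ∈ ixs, i < numbers.length) ∧
    pvMask ixs = m ∧ ops.length = k - 1 ∧ (∀ o ∈ ops, o ∈ pvOpsA) ∧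
    pvEvalLTR (ixs.map (fun i => numbers.getD i 0)) ops = some t

-- the frontier after k expansion steps
def pvIter (numbers : List Int) : Nat → PySem.Set (Nat × Int)
  | 0 => pvInit numbers
  | k + 1 => pvNextF numbers (pvIter numbers k)

theorem pvEvalLoop_snoc (l : List (String × Int)) (r v : Int) (op : String) :
    pvEvalLoop r (l ++ [(op, v)]) = (pvEvalLoop r l).bind (fun r' => pvStep r' v op) := by
  induction l generalizing r with
  | nil => simp [pvEvalLoop, pvStep]
  | cons hd tl ih =>
    obtain ⟨o, w⟩ := hd
    simp only [List.cons_append, pvEvalLoop]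
    split_ifs <;> simp_all

theorem pvEvalLTR_snoc (nums : List Int) (ops : List String) (v : Int) (op : String)
    (hne : nums ≠ []) (hlen : ops.length + 1 = nums.length) :
    pvEvalLTR (nums ++ [v]) (ops ++ [op]) = (pvEvalLTR nums ops).bind (fun r => pvStep r v op) := by
  obtain ⟨h, t, rfl⟩ := List.exists_cons_of_ne_nil hne
  have hl : ops.length = t.length := by simpa using hlen
  simp only [List.cons_append, pvEvalLTR]
  rw [List.zip_append hl]
  simp only [List.zip_cons_cons, List.zip_nil_right]
  exact pvEvalLoop_snoc _ _ _ _

theorem pvExpand_iff (v x w : Int) :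
    w ∈ pvExpand v x ↔ ∃ op ∈ pvOpsA, pvStep v x op = some w := by
  simp only [pvExpand, pvOpsA, pvStep, List.mem_append, List.mem_cons]
  constructor
  · rintro (h | h)
    · rcases h with rfl | rfl | rfl | h
      · exact ⟨"+", by simp⟩
      · exact ⟨"-", by simp⟩
      · exact ⟨"*", by simp⟩
      · simp at h
    · split_ifs at h with hc
      · simp only [List.mem_singleton] at h
        subst h
        exact ⟨"/", by simp [hc.1, hc.2]⟩
      · simp at h
  · rintro ⟨op, hop, hstep⟩
    simp only [List.not_mem_nil, or_false] at hop
    rcases hop with rfl | rfl | rfl | rfl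
    · simp at hstep
      exact Or.inl (Or.inl hstep.symm)
    · simp at hstep
      exact Or.inl (Or.inr (Or.inl hstep.symm))
    · simp at hstep
      exact Or.inl (Or.inr (Or.inr (Or.inl hstep.symm)))
    · simp at hstep
      obtain ⟨⟨hx, hm⟩, hw⟩ := hstep
      refine Or.inr ?_
      rw [if_pos ⟨hx, hm⟩]
      simp [hw]

theorem pvMask_testBit (ixs : List Nat) (j : Nat) :
    (pvMask ixs).testBit j = true ↔ j ∈ ixs := by
  induction ixs with
  | nil => simp [pvMask]
  | cons i t ih =>
    simp only [pvMask, Nat.testBit_or, List.mem_cons, Nat.one_shiftLeft, Nat.testBit_two_pow]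
    rw [Bool.or_eq_true, decide_eq_true_eq, ih]
    exact or_congr_left eq_comm

theorem pvMask_snoc (l : List Nat) (i : Nat) :
    pvMask (l ++ [i]) = pvMask l ||| (1 <<< i) := by
  induction l with
  | nil => simp [pvMask]
  | cons h t ih => simp [pvMask, ih, Nat.or_assoc]

theorem pvReach_one (numbers : List Int) (m : Nat) (t : Int) :
    pvReach numbers 1 m t ↔ ∃ i, i < numbers.length ∧ m = 1 <<< i ∧ t = numbers.getD i 0 := by
  constructor
  · rintro ⟨ixs, ops, hnd, hlen, hbd, hmask, holen, _, heval⟩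
    obtain ⟨i, rfl⟩ : ∃ i, ixs = [i] := by
      cases ixs with
      | nil => simp at hlen
      | cons a t => cases t with
        | nil => exact ⟨a, rfl⟩
        | cons b u => simp at hlen
    have : ops = [] := List.eq_nil_of_length_eq_zero holen
    subst this
    refine ⟨i, hbd i (by simp), ?_, ?_⟩
    · simpa [pvMask] using hmask.symm
    · simpa [pvEvalLTR, pvEvalLoop] using heval.symm
  · rintro ⟨i, hi, rfl, rfl⟩
    exact ⟨[i], [], by simp, rfl, by simpa using hi, by simp [pvMask], rfl, by simp,
      by simp [pvEvalLTR, pvEvalLoop]⟩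

theorem pvReach_succ (numbers : List Int) (k : Nat) (hk : 1 ≤ k) (m : Nat) (t : Int) :
    pvReach numbers (k + 1) m t ↔
      ∃ m' v i op, pvReach numbers k m' v ∧ i < numbers.length ∧ (m'.testBit i = false) ∧
        m = m' ||| (1 <<< i) ∧ op ∈ pvOpsA ∧ pvStep v (numbers.getD i 0) op = some t := by
  constructor
  · rintro ⟨ixs, ops, hnd, hlen, hbd, hmask, holen, hops, heval⟩
    rcases List.eq_nil_or_concat ixs with rfl | ⟨ixs', i, rfl⟩
    · simp at hlen
    rcases List.eq_nil_or_concat ops with rfl | ⟨ops', op, rfl⟩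
    · simp at holen; omega
    simp only [List.concat_eq_append] at hnd hlen hbd hmask holen hops heval
    have hlen' : ixs'.length = k := by simpa using hlen
    have holen' : ops'.length = k - 1 := by simp at holen; omega
    have hnd' : ixs'.Nodup ∧ i ∉ ixs' := by
      rw [List.nodup_append] at hnd
      exact ⟨hnd.1, fun h => hnd.2.2 i h i (by simp) rfl⟩
    have hne : ixs' ≠ [] := by intro h; subst h; simp at hlen'; omega
    have hev : pvEvalLTR ((ixs'.map (fun j => numbers.getD j 0)) ++ [numbers.getD i 0])
        (ops' ++ [op]) = some t := by
      simpa using heval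
    rw [pvEvalLTR_snoc _ _ _ _ (by simpa using hne) (by simp [holen', hlen']; omega)] at hev
    obtain ⟨v, hv, hstep⟩ := Option.bind_eq_some_iff.mp hev
    refine ⟨pvMask ixs', v, i, op, ⟨ixs', ops', hnd'.1, hlen', ?_, rfl, holen', ?_, hv⟩,
      hbd i (by simp), ?_, ?_, hops op (by simp), hstep⟩
    · exact fun j hj => hbd j (by simp [hj])
    · exact fun o ho => hops o (by simp [ho])
    · rw [Bool.eq_false_iff]
      intro h
      exact hnd'.2 ((pvMask_testBit ixs' i).mp h)
    · rw [← hmask, pvMask_snoc]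
  · rintro ⟨m', v, i, op, ⟨ixs', ops', hnd', hlen', hbd', hmask', holen', hops', hev'⟩,
      hi, htb, rfl, hop, hstep⟩
    have hni : i ∉ ixs' := by
      intro h
      have h1 := (pvMask_testBit ixs' i).mpr h
      rw [hmask'] at h1
      rw [h1] at htb
      simp at htb
    have hne : ixs' ≠ [] := by
      intro h
      subst h
      simp at hlen'
      omega
    refine ⟨ixs' ++ [i], ops' ++ [op], ?_, by simp [hlen'], ?_, ?_, ?_, ?_, ?_⟩
    · rw [List.nodup_append]
      refine ⟨hnd', by simp, ?_⟩
      intro a ha b hb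
      rw [List.mem_singleton] at hb
      subst hb
      exact fun he => hni (he ▸ ha)
    · intro j hj
      rcases List.mem_append.mp hj with h | h
      · exact hbd' j h
      · have hj := List.mem_singleton.mp h
        rw [hj]; exact hi
    · rw [pvMask_snoc, hmask']
    · simp [holen']; omega
    · intro o ho
      rcases List.mem_append.mp ho with h | h
      · exact hops' o h
      · have ho' := List.mem_singleton.mp h
        rw [ho']; exact hop
    · rw [List.map_append, List.map_singleton]
      rw [pvEvalLTR_snoc _ _ _ _ (by simpa using hne) (by simp [holen', hlen']; omega)]
      rw [hev']
      simpa using hstep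

theorem pvIter_mem (numbers : List Int) (k : Nat) (mv : Nat × Int) :
    mv ∈ pvIter numbers k ↔ pvReach numbers (k + 1) mv.1 mv.2 := by
  induction k generalizing mv with
  | zero =>
    obtain ⟨m, v⟩ := mv
    rw [pvIter, pvInit, pvReach_one]
    rw [PySem.Set.mem_ofList]
    simp only [List.mem_map, List.mem_range, Prod.mk.injEq]
    constructor
    · rintro ⟨i, hi, rfl, rfl⟩; exact ⟨i, hi, rfl, rfl⟩
    · rintro ⟨i, hi, rfl, rfl⟩; exact ⟨i, hi, rfl, rfl⟩
  | succ k ih =>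
    obtain ⟨m, v⟩ := mv
    rw [pvIter, pvNextF, PySem.Set.mem_ofList,
      pvReach_succ numbers (k + 1) (by omega)]
    simp only [List.mem_flatMap, List.mem_filter, List.mem_range, List.mem_map,
      Bool.not_eq_eq_eq_not, Bool.not_true, Prod.mk.injEq]
    constructor
    · rintro ⟨⟨m', v'⟩, hmem, i, ⟨hi, htb⟩, w, hw, rfl, rfl⟩
      obtain ⟨op, hop, hstep⟩ := (pvExpand_iff v' (numbers.getD i 0) w).mp hw
      exact ⟨m', v', i, op, (ih (m', v')).mp hmem, hi, htb, rfl, hop, hstep⟩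
    · rintro ⟨m', v', i, op, hreach, hi, htb, rfl, hop, hstep⟩
      refine ⟨(m', v'), (ih (m', v')).mpr hreach, i, ⟨hi, htb⟩, v, ?_, rfl, rfl⟩
      exact (pvExpand_iff v' (numbers.getD i 0) v).mpr ⟨op, hop, hstep⟩

theorem pvOpLists_mem (m : Nat) (l : List String) :
    l ∈ pvOpLists m ↔ l.length = m ∧ ∀ o ∈ l, o ∈ pvOpsA := by
  induction m generalizing l with
  | zero =>
    simp only [pvOpLists, List.mem_singleton]
    constructor
    · rintro rfl; simp
    · rintro ⟨h, _⟩; exact List.eq_nil_of_length_eq_zero h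
  | succ m ih =>
    simp only [pvOpLists, List.mem_flatMap, List.mem_map]
    constructor
    · rintro ⟨o, ho, tl, htl, rfl⟩
      obtain ⟨hl, hm⟩ := (ih tl).mp htl
      refine ⟨by simp [hl], ?_⟩
      intro o' h
      rcases List.mem_cons.mp h with rfl | h
      · exact ho
      · exact hm o' h
    · rintro ⟨hl, hm⟩
      cases l with
      | nil => simp at hl
      | cons o tl =>
        refine ⟨o, hm o (by simp), tl, (ih tl).mpr ⟨by simpa using hl, ?_⟩, rfl⟩
        intro o' h
        exact hm o' (List.mem_cons_of_mem _ h)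

-- every permutation of xs occurs in PySem.List.permutations xs xs.length
theorem pvMem_permutations_of_perm {α : Type} [DecidableEq α] :
    ∀ (p xs : List α), p.Perm xs → p ∈ PySem.List.permutations xs xs.length := by
  intro p
  induction p with
  | nil =>
    intro xs h
    have : xs = [] := h.nil_eq.symm
    subst this
    simp [PySem.List.permutations_zero]
  | cons a p' ih =>
    intro xs h
    have ha : a ∈ xs := h.mem_iff.mp (by simp)
    obtain ⟨i, hi, hget⟩ := List.mem_iff_getElem.mp ha
    have hgo : xs[i]? = some a := by
      rw [List.getElem?_eq_getElem hi, hget]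
    have hlen : xs.length = p'.length + 1 := by
      simpa using (h.length_eq).symm
    rw [hlen, PySem.List.permutations_succ]
    simp only [List.mem_flatMap, List.mem_range]
    refine ⟨i, by omega, ?_⟩
    rw [hgo]
    simp only [List.mem_map]
    refine ⟨p', ?_, rfl⟩
    have hperm : p'.Perm (xs.eraseIdx i) := by
      have h1 : (a :: xs.eraseIdx i).Perm xs := PySem.List.perm_cons_eraseIdx xs hgo
      exact (h.trans h1.symm).cons_inv
    have hlen2 : (xs.eraseIdx i).length = p'.length := by
      rw [List.length_eraseIdx_of_lt hi]; omega
    rw [← hlen2]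
    exact ih _ hperm

-- a perm of l.map f is the map of a perm of l
theorem pvPerm_map_lift {α β : Type} [DecidableEq α] (f : α → β) :
    ∀ (p : List β) (l : List α), p.Perm (l.map f) → ∃ l' : List α, l'.Perm l ∧ l'.map f = p := by
  intro p
  induction p with
  | nil =>
    intro l h
    have : l.map f = [] := (List.Perm.nil_eq h).symm
    exact ⟨[], by simp [List.map_eq_nil_iff.mp this], rfl⟩
  | cons b p' ih =>
    intro l h
    have hb : b ∈ l.map f := h.mem_iff.mp (by simp)
    obtain ⟨a, ha, rfl⟩ := List.mem_map.mp hb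
    have hperm : l.Perm (a :: l.erase a) := List.perm_cons_erase ha
    have h2 : (f a :: p').Perm (f a :: (l.erase a).map f) :=
      h.trans (by simpa using hperm.map f)
    obtain ⟨l'', hp, hm⟩ := ih (l.erase a) h2.cons_inv
    exact ⟨a :: l'', (hp.cons a).trans hperm.symm, by simp [hm]⟩

-- a nodup bounded list of naturals is a permutation of a sublist of range n
theorem pvSorted_combo {l : List Nat} {n : Nat} (hnd : l.Nodup) (hbd : ∀ i ∈ l, i < n) :
    ∃ c : List Nat, c.Sublist (List.range n) ∧ c.Perm l := by
  refine ⟨(List.range n).filter (fun i => decide (i ∈ l)), List.filter_sublist, ?_⟩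
  rw [List.perm_ext_iff_of_nodup (List.Nodup.filter _ (List.nodup_range)) hnd]
  intro a
  simp only [List.mem_filter, List.mem_range, decide_eq_true_eq]
  exact ⟨fun h => h.2, fun h => ⟨hbd a h, h⟩⟩

theorem pvLevelA_some (target : Int) (numbers : List Int) (k : Nat) (hk : 1 ≤ k) (v : Int)
    (h : pvLevelA target numbers k = some v) :
    v = (k : Int) - 1 ∧ ∃ m, pvReach numbers k m target := by
  unfold pvLevelA at h
  obtain ⟨combo, hcombo, hinner⟩ := List.exists_of_findSome?_eq_some h
  obtain ⟨hsub, hclen⟩ := (PySem.List.mem_combinations_iff _ _ _).mp hcombo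
  have hcnd : combo.Nodup := hsub.nodup List.nodup_range
  have hcbd : ∀ i ∈ combo, i < numbers.length := by
    intro i hi
    exact List.mem_range.mp (hsub.subset hi)
  by_cases hk1 : k = 1
  · subst hk1
    rw [if_pos rfl] at hinner
    split_ifs at hinner with hc
    · obtain ⟨i, rfl⟩ : ∃ i, combo = [i] := by
        cases combo with
        | nil => simp at hclen
        | cons a t => cases t with
          | nil => exact ⟨a, rfl⟩
          | cons b u => simp at hclen
      simp only [List.map_singleton, List.getD] at hc
      obtain rfl : v = 0 := by simpa using hinner.symm
      refine ⟨by norm_num, 1 <<< i, (pvReach_one numbers _ target).mpr ⟨i, hcbd i (by simp), rfl, ?_⟩⟩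
      simpa using hc.symm
  · rw [if_neg hk1] at hinner
    obtain ⟨perm, hpmem, hinner2⟩ := List.exists_of_findSome?_eq_some hinner
    obtain ⟨opsl, homem, hinner3⟩ := List.exists_of_findSome?_eq_some hinner2
    split_ifs at hinner3 with hc
    · obtain rfl : v = (k : Int) - 1 := by simpa using hinner3.symm
      refine ⟨rfl, ?_⟩
      have hperm : perm.Perm (combo.map (fun i => numbers.getD i 0)) :=
        PySem.List.perm_of_mem_permutations hpmem
      obtain ⟨ixs, hixp, hixm⟩ := pvPerm_map_lift _ perm combo hperm
      obtain ⟨holen, homemb⟩ := (pvOpLists_mem _ _).mp homem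
      refine ⟨pvMask ixs, ixs, opsl, hixp.symm.nodup hcnd, by rw [hixp.length_eq, hclen], ?_,
        rfl, by omega, homemb, by rw [hixm]; exact hc⟩
      intro i hi
      exact hcbd i (hixp.mem_iff.mp hi)

theorem pvLevelA_of_hit (target : Int) (numbers : List Int) (k : Nat) (hk : 1 ≤ k)
    (h : ∃ m, pvReach numbers k m target) :
    pvLevelA target numbers k ≠ none := by
  obtain ⟨m, ixs, ops, hnd, hlen, hbd, hmask, holen, hops, heval⟩ := h
  intro hnone
  unfold pvLevelA at hnone
  rw [List.findSome?_eq_none_iff] at hnone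
  obtain ⟨c, hcsub, hcperm⟩ := pvSorted_combo hnd hbd
  have hcmem : c ∈ PySem.List.combinations (List.range numbers.length) k :=
    (PySem.List.mem_combinations_iff _ _ _).mpr ⟨hcsub, by rw [hcperm.length_eq, hlen]⟩
  have hinner := hnone c hcmem
  by_cases hk1 : k = 1
  · subst hk1
    rw [if_pos rfl] at hinner
    obtain ⟨i, rfl⟩ : ∃ i, ixs = [i] := by
      cases ixs with
      | nil => simp at hlen
      | cons a t => cases t with
        | nil => exact ⟨a, rfl⟩
        | cons b u => simp at hlen
    obtain rfl : c = [i] := List.perm_singleton.mp hcperm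
    obtain rfl : ops = [] := List.eq_nil_of_length_eq_zero holen
    have : numbers.getD i 0 = target := by
      simpa [pvEvalLTR, pvEvalLoop] using heval
    rw [List.map_singleton] at hinner
    simp [List.getD] at hinner
    rw [List.getD_eq_getElem?_getD] at this
    exact hinner this
  · rw [if_neg hk1] at hinner
    rw [List.findSome?_eq_none_iff] at hinner
    have hpmem : ixs.map (fun i => numbers.getD i 0) ∈
        PySem.List.permutations (c.map (fun i => numbers.getD i 0))
          (c.map (fun i => numbers.getD i 0)).length :=
      pvMem_permutations_of_perm _ _ (hcperm.symm.map _)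
    have hinner2 := hinner _ hpmem
    rw [List.findSome?_eq_none_iff] at hinner2
    have homem : ops ∈ pvOpLists (k - 1) := (pvOpLists_mem _ _).mpr ⟨holen, hops⟩
    have := hinner2 ops homem
    rw [if_pos heval] at this
    simp at this

theorem pvMain (target : Int) (numbers : List Int) :
    ∀ fuel k, 1 ≤ k → k + fuel = min numbers.length 6 + 1 →
      pvBfs target numbers (min numbers.length 6) fuel k (pvIter numbers (k - 1)) =
        ((List.range' k fuel).findSome? (pvLevelA target numbers)).getD (-1) := by
  intro fuel
  induction fuel with
  | zero => intro k _ _; rfl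
  | succ fuel ih =>
    intro k hk hcap
    obtain ⟨j, rfl⟩ : ∃ j, k = j + 1 := ⟨k - 1, by omega⟩
    rw [List.range'_succ, List.findSome?_cons, pvBfs]
    by_cases hany : (pvIter numbers (j + 1 - 1)).any (fun mv => mv.2 == target) = true
    · rw [if_pos hany]
      obtain ⟨mv, hmem, hveq⟩ := List.any_eq_true.mp hany
      have hreach : pvReach numbers (j + 1) mv.1 mv.2 := by
        have := (pvIter_mem numbers j mv).mp (by simpa using hmem)
        exact this
      rw [beq_iff_eq] at hveq
      subst hveq
      have hhit : ∃ m, pvReach numbers (j + 1) m mv.2 := ⟨mv.1, hreach⟩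
      cases hsome : pvLevelA mv.2 numbers (j + 1) with
      | none => exact absurd hsome (pvLevelA_of_hit _ _ _ hk hhit)
      | some v =>
        obtain ⟨rfl, -⟩ := pvLevelA_some _ _ _ hk _ hsome
        rfl
    · rw [if_neg hany]
      have hnohit : ∀ v, pvLevelA target numbers (j + 1) ≠ some v := by
        intro v hv
        obtain ⟨-, m, hreach⟩ := pvLevelA_some _ _ _ hk _ hv
        refine hany (List.any_eq_true.mpr ⟨(m, target), ?_, by simp⟩)
        simpa using (pvIter_mem numbers j (m, target)).mpr hreach
      have hnone : pvLevelA target numbers (j + 1) = none := by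
        cases hL : pvLevelA target numbers (j + 1) with
        | none => rfl
        | some v => exact absurd hL (hnohit v)
      rw [hnone]
      by_cases hcapeq : j + 1 = min numbers.length 6
      · rw [if_pos hcapeq]
        obtain rfl : fuel = 0 := by omega
        rfl
      · rw [if_neg hcapeq]
        have : pvNextF numbers (pvIter numbers (j + 1 - 1)) = pvIter numbers (j + 1 + 1 - 1) := by
          simp [pvIter]
        rw [this]
        exact ih (j + 1 + 1) (by omega) (by omega)

-- ===== VERDICT (by name: the statement is the Claim_ definition above) =====
theorem find_min_steps_py_spec : Claim_equal_find_min_steps_py := by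
  intro target numbers _
  unfold Spec_find_min_steps_py find_min_steps_py find_min_steps_py_alt
  have hmin : min (numbers.length + 1) 7 - 1 = min numbers.length 6 := by omega
  rw [hmin]
  have := pvMain target numbers (min numbers.length 6) 1 (by norm_num) (by omega)
  simpa [pvIter, pvInit] using this.symm
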